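-- pv_equiv track=rewrite | github.com/LessTanker/xv6-graphRAG | src/backend/utils.py | sanitize_compile_args
-- ===== SOURCE A (Python) =====
-- from typing import TYPE_CHECKING, Any, Dict, List, Optional, Set, Tuple
--
-- def sanitize_compile_args(args: List[str], src_file: str, directory_abs: str) -> List[str]:
--     if not args:
--         return []
--
--     out: List[str] = ["-working-directory", directory_abs]
--     skip_next = False
--     for i, a in enumerate(args):
--         if i == 0:
--             continue
--         if skip_next:
--             skip_next = False
--             continue
--         if a in {"-c", "-o", "-MMD", "-MF", "-MT", "-MQ"}:
--             if a != "-c":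
--                 skip_next = True
--             continue
--         if a.startswith("-o") and len(a) > 2:
--             continue
--         if a == src_file:
--             continue
--         out.append(a)
--
--     if "-x" not in out:
--         out.extend(["-x", "c"])
--     return out
-- ===== SOURCE B (Python) =====
-- VALUE_OPTS = ("-o", "-MMD", "-MF", "-MT", "-MQ")
--
-- def _keep(a, src_file):
--     return a != "-c" and not (a.startswith("-o") and len(a) > 2) and a != src_file
--
-- def _first_value_opt(tokens):
--     for i, a in enumerate(tokens):
--         if a in VALUE_OPTS:
--             return i
--     return None
--
-- def sanitize_compile_args(args, src_file, directory_abs):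
--     if not args:
--         return []
--     out = ["-working-directory", directory_abs]
--     rest = args[1:]
--     while (j := _first_value_opt(rest)) is not None:
--         out += [a for a in rest[:j] if _keep(a, src_file)]
--         rest = rest[j + 2:]
--     out += [a for a in rest if _keep(a, src_file)]
--     if "-x" not in out:
--         out += ["-x", "c"]
--     return out
-- ===== Notes on version B (the rewrite author's own statement) =====
-- stated objective: alternative
-- what changed: B is staged instead of a stateful single pass: it repeatedly finds the first value-taking option, filters the flag-free segment before it with a stateless per-token predicate (comprehension) and slices away the option together with its argument, so A's carried skip_next flag disappears entirely.
import Mathlib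
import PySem

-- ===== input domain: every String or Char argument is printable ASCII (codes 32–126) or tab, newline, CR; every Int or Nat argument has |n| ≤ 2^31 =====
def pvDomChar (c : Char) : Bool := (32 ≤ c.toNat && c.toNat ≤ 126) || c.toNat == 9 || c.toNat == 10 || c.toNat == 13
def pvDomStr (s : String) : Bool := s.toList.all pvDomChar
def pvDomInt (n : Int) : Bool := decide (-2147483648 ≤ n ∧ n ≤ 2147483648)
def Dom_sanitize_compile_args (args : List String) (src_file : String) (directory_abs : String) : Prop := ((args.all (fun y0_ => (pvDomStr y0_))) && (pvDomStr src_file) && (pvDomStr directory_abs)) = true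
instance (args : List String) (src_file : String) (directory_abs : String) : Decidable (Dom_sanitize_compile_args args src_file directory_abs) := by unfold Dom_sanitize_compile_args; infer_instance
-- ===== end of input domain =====

-- B replaces A's single pass with a carried skip_next flag by a staged decomposition:
-- find the first value-taking option, filter the flag-free segment before it with a stateless
-- per-token predicate, slice away the option and its argument, repeat; alternative, same cost.


-- ===== PORT A =====
-- step of A's `for i, a in enumerate(args)` loop; state = (out, skip_next)
def aStep (src_file : String) (st : List String × Bool) (p : Int × String) : List String × Bool :=
  if p.1 == 0 then st
  else if st.2 then (st.1, false)
  else if p.2 = "-c" ∨ p.2 = "-o" ∨ p.2 = "-MMD" ∨ p.2 = "-MF" ∨ p.2 = "-MT" ∨ p.2 = "-MQ" then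
    (st.1, decide (p.2 ≠ "-c"))
  else if PySem.Str.startswith p.2 "-o" = true ∧ 2 < PySem.Str.len p.2 then (st.1, false)
  else if p.2 = src_file then (st.1, false)
  else (st.1 ++ [p.2], false)

def sanitize_compile_args (args : List String) (src_file : String) (directory_abs : String) : List String :=
  if args = [] then []
  else
    let out := ((PySem.List.enumerate args 0).foldl (aStep src_file) (["-working-directory", directory_abs], false)).1
    if "-x" ∈ out then out else out ++ ["-x", "c"]

-- ===== PORT B =====
-- Source B's stateless per-token predicate `_keep`
def keepTok (src_file : String) (a : String) : Bool :=
  decide (a ≠ "-c") && !(PySem.Str.startswith a "-o" && decide (2 < PySem.Str.len a)) && decide (a ≠ src_file)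

-- Source B's `_first_value_opt`: index of the first value-taking option, if any
def firstValueOpt : List String → Option Nat
  | [] => none
  | a :: t =>
    if a = "-o" ∨ a = "-MMD" ∨ a = "-MF" ∨ a = "-MT" ∨ a = "-MQ" then some 0
    else (firstValueOpt t).map (· + 1)

theorem firstValueOpt_lt {l : List String} {j : Nat} (h : firstValueOpt l = some j) : j < l.length := by
  induction l generalizing j with
  | nil => simp [firstValueOpt] at h
  | cons a t ih =>
    simp only [firstValueOpt] at h
    split_ifs at h with h1
    · cases h; simp
    · cases hj : firstValueOpt t with
      | none => simp [hj] at h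
      | some j' =>
        simp [hj] at h
        have := ih hj
        simp; omega

-- Source B's `while` loop: segment-filter up to the first value option, slice it and its argument away
def bStage (src_file : String) (rest out : List String) : List String :=
  match h : firstValueOpt rest with
  | none => out ++ rest.filter (keepTok src_file)
  | some j => bStage src_file (rest.drop (j + 2)) (out ++ (rest.take j).filter (keepTok src_file))
termination_by rest.length
decreasing_by
  have := firstValueOpt_lt h
  simp [List.length_drop]; omega

def sanitize_compile_args_alt (args : List String) (src_file : String) (directory_abs : String) : List String :=
  if args = [] then []
  else
    let out := bStage src_file (args.drop 1) ["-working-directory", directory_abs]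
    if "-x" ∈ out then out else out ++ ["-x", "c"]

-- ===== PRECONDITION & SPEC =====
def Spec_sanitize_compile_args (args : List String) (src_file : String) (directory_abs : String) (out : List String) : Prop := out = sanitize_compile_args_alt args src_file directory_abs
instance (args : List String) (src_file : String) (directory_abs : String) (out : List String) : Decidable (Spec_sanitize_compile_args args src_file directory_abs out) := by unfold Spec_sanitize_compile_args; infer_instance

-- ===== CLAIM (what is proved, stated in full; the proofs are below) =====
def Claim_equal_sanitize_compile_args : Prop := ∀ (args : List String) (src_file : String) (directory_abs : String), Dom_sanitize_compile_args args src_file directory_abs → Spec_sanitize_compile_args args src_file directory_abs (sanitize_compile_args args src_file directory_abs)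

-- ===== LEMMAS AND PROOFS =====

theorem bStage_eq_none (src_file : String) (rest out : List String) (h : firstValueOpt rest = none) :
    bStage src_file rest out = out ++ rest.filter (keepTok src_file) := by
  rw [bStage]; split <;> simp_all

theorem bStage_eq_some (src_file : String) (rest out : List String) (j : Nat) (h : firstValueOpt rest = some j) :
    bStage src_file rest out = bStage src_file (rest.drop (j + 2)) (out ++ (rest.take j).filter (keepTok src_file)) := by
  rw [bStage]
  split
  · next heq => rw [h] at heq; cases heq
  · next j' heq =>
      rw [h] at heq
      cases heq
      rfl

-- pure list-recursion model of A's loop body (after the i == 0 entry has been skipped)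
def fA (src_file : String) : List String → List String → Bool → List String
  | [], out, _ => out
  | a :: t, out, skip =>
    if skip then fA src_file t out false
    else if a = "-c" ∨ a = "-o" ∨ a = "-MMD" ∨ a = "-MF" ∨ a = "-MT" ∨ a = "-MQ" then
      fA src_file t out (decide (a ≠ "-c"))
    else if PySem.Str.startswith a "-o" = true ∧ 2 < PySem.Str.len a then fA src_file t out false
    else if a = src_file then fA src_file t out false
    else fA src_file t (out ++ [a]) false

theorem foldl_enumerate_eq_fA (src_file : String) (l : List String) :
    ∀ (s : Int) (out : List String) (skip : Bool), 1 ≤ s →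
      ((PySem.List.enumerate l s).foldl (aStep src_file) (out, skip)).1 = fA src_file l out skip := by
  induction l with
  | nil => intro s out skip _; simp [PySem.List.enumerate, fA]
  | cons a t ih =>
    intro s out skip hs
    rw [PySem.List.enumerate_cons]
    have h0 : (s == 0) = false := by simp; omega
    simp only [List.foldl_cons, aStep, h0, Bool.false_eq_true, if_false]
    cases skip with
    | true => simpa [fA] using ih (s + 1) out false (by omega)
    | false =>
      simp only [Bool.false_eq_true, if_false, fA]
      split_ifs with h1 h2 h3 <;> exact ih (s + 1) _ _ (by omega)

-- one-step unfolding of bStage on a head that is not a value-taking option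
theorem bStage_cons_nonflag (src_file a : String) (t out : List String)
    (h : ¬ (a = "-o" ∨ a = "-MMD" ∨ a = "-MF" ∨ a = "-MT" ∨ a = "-MQ")) :
    bStage src_file (a :: t) out = bStage src_file t (out ++ (if keepTok src_file a then [a] else [])) := by
  cases hj : firstValueOpt t with
  | none =>
    have hc : firstValueOpt (a :: t) = none := by simp [firstValueOpt, h, hj]
    rw [bStage_eq_none src_file (a :: t) out hc, bStage_eq_none src_file t _ hj]
    simp only [List.filter_cons]
    cases keepTok src_file a <;> simp
  | some j =>
    have hc : firstValueOpt (a :: t) = some (j + 1) := by simp [firstValueOpt, h, hj]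
    rw [bStage_eq_some src_file (a :: t) out (j + 1) hc, bStage_eq_some src_file t _ j hj]
    have hd : (a :: t).drop (j + 1 + 2) = t.drop (j + 2) := by simp [List.drop_succ_cons]
    have ht : (a :: t).take (j + 1) = a :: t.take j := by simp [List.take_succ_cons]
    rw [hd, ht]
    simp only [List.filter_cons]
    cases keepTok src_file a <;> simp

-- A's loop model equals B's staged loop
theorem fA_eq_bStage (src_file : String) :
    ∀ (n : Nat) (l : List String), l.length ≤ n → ∀ out, fA src_file l out false = bStage src_file l out := by
  intro n
  induction n with
  | zero =>
    intro l hl out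
    have hnil : l = [] := by cases l <;> simp_all
    subst hnil
    rw [bStage_eq_none _ _ _ (by simp [firstValueOpt])]; simp [fA]
  | succ n ih =>
    intro l hl out
    match l with
    | [] => rw [bStage_eq_none _ _ _ (by simp [firstValueOpt])]; simp [fA]
    | a :: t =>
      simp only [List.length_cons] at hl
      by_cases hv : a = "-o" ∨ a = "-MMD" ∨ a = "-MF" ∨ a = "-MT" ∨ a = "-MQ"
      · have hc : ¬ a = "-c" := by rcases hv with h | h | h | h | h <;> subst h <;> decide
        have hA : fA src_file (a :: t) out false = fA src_file t out true := by
          simp only [fA, Bool.false_eq_true, if_false, if_pos (Or.inr hv)]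
          congr 1
          simp [hc]
        have hB : bStage src_file (a :: t) out = bStage src_file t.tail out := by
          have hf : firstValueOpt (a :: t) = some 0 := by simp [firstValueOpt, hv]
          rw [bStage_eq_some src_file (a :: t) out 0 hf]
          have hd : (a :: t).drop (0 + 2) = t.tail := by
            simp [List.drop_succ_cons, List.drop_one]
          rw [hd]
          simp
        rw [hA, hB]
        cases t with
        | nil => rw [bStage_eq_none _ _ _ (by simp [firstValueOpt])]; simp [fA]
        | cons b t' =>
          have hskip : fA src_file (b :: t') out true = fA src_file t' out false := by
            simp [fA]
          rw [hskip, List.tail_cons]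
          exact ih t' (by simp at hl; omega) out
      · rw [bStage_cons_nonflag src_file a t out hv]
        by_cases hc : a = "-c"
        · subst hc
          have hA : fA src_file ("-c" :: t) out false = fA src_file t out false := by
            simp [fA]
          have hk : keepTok src_file "-c" = false := by simp [keepTok]
          rw [hA, hk]
          simpa using ih t (by omega) out
        · have hset : ¬ (a = "-c" ∨ a = "-o" ∨ a = "-MMD" ∨ a = "-MF" ∨ a = "-MT" ∨ a = "-MQ") := by
            rintro (hx | hx)
            · exact hc hx
            · exact hv hx
          simp only [fA, Bool.false_eq_true, if_false, if_neg hset]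
          by_cases ho : PySem.Str.startswith a "-o" = true ∧ 2 < PySem.Str.len a
          · have hk : keepTok src_file a = false := by
              unfold keepTok
              rw [ho.1, decide_eq_true ho.2]
              simp only [Bool.and_true, Bool.not_true, Bool.and_false, Bool.false_and]
            rw [if_pos ho, hk]
            simpa using ih t (by omega) out
          · by_cases hsrc : a = src_file
            · have hk : keepTok src_file a = false := by
                unfold keepTok
                rw [decide_eq_false (not_not_intro hsrc)]
                simp only [Bool.and_false]
              rw [if_neg ho, if_pos hsrc, hk]
              simpa using ih t (by omega) out
            · have hk : keepTok src_file a = true := by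
                unfold keepTok
                have hx : (PySem.Str.startswith a "-o" && decide (2 < PySem.Str.len a)) = false := by
                  by_cases h1 : PySem.Str.startswith a "-o" = true
                  · rw [h1, decide_eq_false (fun hh => ho ⟨h1, hh⟩)]
                    simp only [Bool.true_and]
                  · rw [Bool.not_eq_true] at h1
                    rw [h1]
                    exact Bool.false_and _
                rw [decide_eq_true hc, decide_eq_true hsrc, hx]
                rfl
              rw [if_neg ho, if_neg hsrc, hk]
              simp only [if_true]
              exact ih t (by omega) _

-- ===== VERDICT (by name: the statement is the Claim_ definition above) =====
theorem sanitize_compile_args_spec : Claim_equal_sanitize_compile_args := by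
  intro args src_file directory_abs _
  unfold Spec_sanitize_compile_args sanitize_compile_args sanitize_compile_args_alt
  cases args with
  | nil => rfl
  | cons a0 rest =>
    simp only [List.cons_ne_nil]
    rw [PySem.List.enumerate_cons]
    have : aStep src_file (["-working-directory", directory_abs], false) (0, a0)
        = (["-working-directory", directory_abs], false) := by simp [aStep]
    rw [List.foldl_cons, this,
      foldl_enumerate_eq_fA src_file rest (0 + 1) _ false (by norm_num),
      fA_eq_bStage src_file rest.length rest (le_refl _),
      List.drop_one, List.tail_cons]
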